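-- pv_equiv track=rewrite | github.com/Macorov/University_Practice | practice115.py | function_name
-- ===== SOURCE A (Python) =====
-- def function_name(num1):
--     count = 0
--     sum1 = ""
--     for i in range(num1):
--         if count == 0:
--             sum1 += "A"*num1 + "\n"
--         elif count == num1-1:
--             sum1 += "#"*(num1-1) + "A"*num1
--         else:
--             sum1 += "#"*count +"A" +"*"*(num1-2) + "A"+'\n'
--         count += 1
--     return sum1
-- ===== SOURCE B (Python) =====
-- def function_name(num1):
--     n = num1
--     if n <= 0:
--         return ""
--     top = "A" * n
--     if n == 1:
--         return top + "\n"
--     lines = [top]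
--     cur = "A" + "*" * (n - 2) + "A"
--     for _ in range(n - 2):
--         cur = "#" + cur
--         lines.append(cur)
--     lines.append("#" * (n - 1) + top)
--     return "\n".join(lines)
-- ===== Notes on version B (the rewrite author's own statement) =====
-- stated objective: alternative
-- what changed: B derives each middle row incrementally from the previous row by prepending one '#' (no per-row '#'*count repetition and no per-iteration three-way position test), collects newline-free rows in a list and assembles the result with a single '\n'.join, whereas A rebuilds every row from repeated segments inside one counted loop with a three-way branch and appends trailing newlines per row.
import Mathlib
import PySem

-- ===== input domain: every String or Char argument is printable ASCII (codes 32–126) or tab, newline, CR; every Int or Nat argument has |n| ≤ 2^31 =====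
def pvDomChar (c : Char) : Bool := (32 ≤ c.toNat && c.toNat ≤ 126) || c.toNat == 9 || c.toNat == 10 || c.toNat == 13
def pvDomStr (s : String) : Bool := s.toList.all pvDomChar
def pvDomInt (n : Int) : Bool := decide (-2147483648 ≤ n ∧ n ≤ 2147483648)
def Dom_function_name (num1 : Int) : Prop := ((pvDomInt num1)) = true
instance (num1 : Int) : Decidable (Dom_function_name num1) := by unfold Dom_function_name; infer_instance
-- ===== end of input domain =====

-- B derives each middle row from the previous one by prepending '#' and joins the
-- newline-free rows with '\n'.join, instead of A's counted loop that rebuilds every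
-- row from repeated segments with a three-way branch; objective: alternative, same cost.

-- ===== PORT A =====
-- "c"*n for a possibly negative n (Python gives "" then)
def pvRep (c : Char) (n : Int) : List Char := List.replicate n.toNat c

-- the loop body: state (count, sum1); the loop variable is ignored (range only drives the count)
def pvStepA (num1 : Int) (st : Int × List Char) (_i : Int) : Int × List Char :=
  let count := st.1
  let sum1 := st.2
  let sum1 :=
    if count = 0 then sum1 ++ pvRep 'A' num1 ++ ['\n']
    else if count = num1 - 1 then sum1 ++ pvRep '#' (num1 - 1) ++ pvRep 'A' num1
    else sum1 ++ pvRep '#' count ++ ['A'] ++ pvRep '*' (num1 - 2) ++ ['A'] ++ ['\n']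
  (count + 1, sum1)

def function_name (num1 : Int) : String :=
  String.ofList ((PySem.List.pyRange 0 num1 1).foldl (pvStepA num1) (0, [])).2

-- ===== PORT B =====
-- B's loop body: state (cur, lines); prepend '#' to the previous row, append it
def pvStepB (st : List Char × List (List Char)) (_i : Int) : List Char × List (List Char) :=
  let cur := '#' :: st.1
  (cur, st.2 ++ [cur])

def function_name_alt (num1 : Int) : String :=
  if num1 ≤ 0 then String.ofList []
  else
    let top := pvRep 'A' num1
    if num1 = 1 then String.ofList (top ++ ['\n'])
    else
      let start : List Char × List (List Char) :=
        (['A'] ++ pvRep '*' (num1 - 2) ++ ['A'], [top])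
      let st := (PySem.List.pyRange 0 (num1 - 2) 1).foldl pvStepB start
      String.ofList (PySem.Chars.join ['\n'] (st.2 ++ [pvRep '#' (num1 - 1) ++ top]))

-- ===== PRECONDITION & SPEC =====
def Spec_function_name (num1 : Int) (out : String) : Prop := out = function_name_alt num1
instance (num1 : Int) (out : String) : Decidable (Spec_function_name num1 out) := by unfold Spec_function_name; infer_instance

-- ===== CLAIM (what is proved, stated in full; the proofs are below) =====
def Claim_equal_function_name : Prop := ∀ (num1 : Int), Dom_function_name num1 → Spec_function_name num1 (function_name num1)

-- ===== LEMMAS AND PROOFS =====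

-- one middle row of the pattern, with its trailing newline (A's middle branch)
def pvMidRow (num1 i : Int) : List Char :=
  pvRep '#' i ++ ['A'] ++ pvRep '*' (num1 - 2) ++ ['A'] ++ ['\n']

-- the middle phase of A's loop: counts stay strictly between 0 and num1-1, so only the
-- middle branch fires, and the accumulated text is exactly the middle rows
theorem pv_mid_fold (num1 : Int) : ∀ (m : Nat) (c : Int) (s : List Char) (L : List Int),
    L.length = m → 1 ≤ c → c + m ≤ num1 - 1 →
    L.foldl (pvStepA num1) (c, s)
      = (c + m, s ++ ((PySem.List.pyRange c (c + m) 1).map (pvMidRow num1)).flatten) := by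
  intro m
  induction m with
  | zero =>
    intro c s L hL _ _
    match L, hL with
    | [], _ => simp
  | succ m ih =>
    intro c s L hL hc hub
    match L, hL with
    | x :: L', hL =>
      have hL' : L'.length = m := by simpa using hL
      have hstep : pvStepA num1 (c, s) x = (c + 1, s ++ pvMidRow num1 c) := by
        have h0 : ¬ c = 0 := by omega
        have h1 : ¬ c = num1 - 1 := by push_cast at hub; omega
        simp [pvStepA, pvMidRow, h0, h1]
      have hrange : PySem.List.pyRange c (c + (m + 1 : Nat)) 1
          = c :: PySem.List.pyRange (c + 1) (c + (m + 1 : Nat)) 1 :=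
        PySem.List.pyRange_one_cons (by push_cast; omega)
      calc (x :: L').foldl (pvStepA num1) (c, s)
          = L'.foldl (pvStepA num1) (c + 1, s ++ pvMidRow num1 c) := by
            rw [List.foldl_cons, hstep]
        _ = ((c + 1) + (m : Nat),
             (s ++ pvMidRow num1 c)
               ++ ((PySem.List.pyRange (c + 1) ((c + 1) + (m : Nat)) 1).map (pvMidRow num1)).flatten) := by
            exact ih (c + 1) _ L' hL' (by omega) (by push_cast at hub; omega)
        _ = (c + ((m : Nat) + 1 : Nat),
             s ++ ((PySem.List.pyRange c (c + ((m : Nat) + 1 : Nat)) 1).map (pvMidRow num1)).flatten) := by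
            rw [hrange]
            push_cast
            rw [show c + ((m : Int) + 1) = (c + 1) + (m : Int) from by omega]
            simp [List.append_assoc]

-- B's loop: after m iterations cur carries m leading '#', and lines has collected
-- every intermediate row
theorem pv_b_fold : ∀ (m : Nat) (L : List Int), L.length = m →
    ∀ (c : List Char) (ls : List (List Char)),
    L.foldl pvStepB (c, ls)
      = (List.replicate m '#' ++ c,
         ls ++ (List.range m).map (fun k => List.replicate (k + 1) '#' ++ c)) := by
  intro m
  induction m with
  | zero =>
    intro L hL c ls
    match L, hL with
    | [], _ => simp
  | succ m ih =>
    intro L hL c ls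
    match L, hL with
    | x :: L', hL =>
      have hL' : L'.length = m := by simpa using hL
      rw [List.foldl_cons, show pvStepB (c, ls) x = ('#' :: c, ls ++ ['#' :: c]) from rfl,
          ih L' hL' ('#' :: c) (ls ++ ['#' :: c])]
      rw [Prod.mk.injEq]
      refine ⟨?_, ?_⟩
      · rw [List.replicate_succ']
        simp
      · rw [List.range_succ_eq_map]
        simp [List.replicate_succ', Function.comp, List.append_assoc]

-- '\n'.join of rows-plus-final-row is the rows with trailing newlines, then the final row
theorem pv_join (last : List Char) : ∀ (rows : List (List Char)),
    PySem.Chars.join ['\n'] (rows ++ [last])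
      = (rows.map (· ++ ['\n'])).flatten ++ last := by
  intro rows
  induction rows with
  | nil => simp [PySem.Chars.join_singleton]
  | cons r rest ih =>
    obtain ⟨y, ys, hy⟩ : ∃ y ys, rest ++ [last] = y :: ys := by
      cases rest <;> simp
    rw [List.cons_append, hy, PySem.Chars.join_cons_cons, ← hy, ih]
    simp [List.append_assoc]

-- the two ports produce the same character list
theorem pv_eq_lists (num1 : Int) :
    ((PySem.List.pyRange 0 num1 1).foldl (pvStepA num1) (0, [])).2
      = (function_name_alt num1).toList := by
  by_cases h0 : num1 ≤ 0
  · rw [PySem.List.pyRange_one_eq_nil h0]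
    simp [function_name_alt, h0]
  · rcases (by omega : (1:Int) ≤ num1).eq_or_lt with h1 | h2
    · subst h1; decide
    · -- num1 ≥ 2
      -- A side
      have hsplit : PySem.List.pyRange 0 num1 1
          = 0 :: (PySem.List.pyRange 1 (num1 - 1) 1 ++ [num1 - 1]) := by
        have h := PySem.List.pyRange_one_succ_right (a := 1) (b := num1 - 1) (by omega)
        rw [show num1 - 1 + 1 = num1 from by omega] at h
        rw [PySem.List.pyRange_one_cons (by omega : (0:Int) < num1),
            show (0:Int) + 1 = 1 from rfl, h]
      rw [hsplit]
      have hfirst : pvStepA num1 ((0 : Int), ([] : List Char)) 0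
          = (1, pvRep 'A' num1 ++ ['\n']) := by simp [pvStepA]
      rw [List.foldl_cons, hfirst, List.foldl_append]
      have hmid := pv_mid_fold num1 (num1 - 2).toNat 1 (pvRep 'A' num1 ++ ['\n'])
        (PySem.List.pyRange 1 (num1 - 1) 1)
        (by rw [PySem.List.length_pyRange_one]; omega)
        le_rfl (by omega)
      have hone : (1 : Int) + ((num1 - 2).toNat : Int) = num1 - 1 := by omega
      rw [hone] at hmid
      rw [hmid]
      have hne : ¬ num1 - 1 = 0 := by omega
      simp only [List.foldl_cons, List.foldl_nil, pvStepA, hne]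
      -- B side
      have hno : ¬ num1 = 1 := by omega
      have hB := pv_b_fold (num1 - 2).toNat (PySem.List.pyRange 0 (num1 - 2) 1)
        (by rw [PySem.List.length_pyRange_one]; omega)
        (['A'] ++ pvRep '*' (num1 - 2) ++ ['A']) [pvRep 'A' num1]
      simp only [function_name_alt, if_neg h0, if_neg hno, hB, String.toList_ofList]
      rw [List.append_assoc, pv_join]
      -- match the middle rows
      have hmids : ((List.range (num1 - 2).toNat).map
            (fun k => List.replicate (k + 1) '#' ++ (['A'] ++ pvRep '*' (num1 - 2) ++ ['A']))).map
              (· ++ ['\n'])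
          = (PySem.List.pyRange 1 (num1 - 1) 1).map (pvMidRow num1) := by
        rw [PySem.List.pyRange_one, show (num1 - 1 - 1).toNat = (num1 - 2).toNat from by omega,
            List.map_map, List.map_map]
        apply List.map_congr_left
        intro k _
        simp only [Function.comp, pvMidRow, pvRep]
        rw [show ((1 : Int) + (k : Int)).toNat = k + 1 from by omega]
        simp [List.append_assoc]
      simp only [if_false, if_true]
      simp [List.append_assoc]
      rw [← List.map_map]
      exact congrArg List.flatten hmids.symm

-- ===== VERDICT (by name: the statement is the Claim_ definition above) =====
theorem function_name_spec : Claim_equal_function_name := by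
  intro num1 _
  show function_name num1 = function_name_alt num1
  unfold function_name
  rw [pv_eq_lists num1]
  exact String.ofList_toList
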